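-- pv_equiv track=rewrite | github.com/pratibhaprasadgupta745-arch/autoVAPT | backend/utils/risk_engine.py | calculate_risk_score
-- ===== SOURCE A (Python) =====
-- def calculate_risk_score(vulnerabilities):
--     """
--     Calculate risk score based on vulnerability severity.
--     Score starts from 100 and decreases based on severity.
--     """
--
--     # If no vulnerabilities found
--     if not vulnerabilities:
--         return None  # means scan not run yet
--
--     score = 100
--
--     for v in vulnerabilities:
--         severity = (v.get("severity") or "").lower()
--
--         if severity == "critical":
--             score -= 25
--         elif severity == "high":
--             score -= 15
--         elif severity == "medium":
--             score -= 8
--         elif severity == "low":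
--             score -= 3
--
--     # Ensure score stays between 0 - 100
--     if score < 0:
--         score = 0
--     if score > 100:
--         score = 100
--
--     return score
-- ===== SOURCE B (Python) =====
-- def calculate_risk_score(vulnerabilities):
--     if not vulnerabilities:
--         return None
--     # pass 1: normalize severities; pass 2: weighted counts of the four known categories
--     sevs = [(v.get("severity") or "").lower() for v in vulnerabilities]
--     penalty = sum(w * sevs.count(s) for s, w in (("critical", 25), ("high", 15), ("medium", 8), ("low", 3)))
--     return max(0, min(100, 100 - penalty))
-- ===== Notes on version B (the rewrite author's own statement) =====
-- stated objective: alternative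
-- what changed: Replaces the single accumulating branch-chain loop with two separate passes: normalize all severities into a list, then compute the score as 100 minus a weighted sum of the four category counts, clamped arithmetically with max/min.
import Mathlib
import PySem

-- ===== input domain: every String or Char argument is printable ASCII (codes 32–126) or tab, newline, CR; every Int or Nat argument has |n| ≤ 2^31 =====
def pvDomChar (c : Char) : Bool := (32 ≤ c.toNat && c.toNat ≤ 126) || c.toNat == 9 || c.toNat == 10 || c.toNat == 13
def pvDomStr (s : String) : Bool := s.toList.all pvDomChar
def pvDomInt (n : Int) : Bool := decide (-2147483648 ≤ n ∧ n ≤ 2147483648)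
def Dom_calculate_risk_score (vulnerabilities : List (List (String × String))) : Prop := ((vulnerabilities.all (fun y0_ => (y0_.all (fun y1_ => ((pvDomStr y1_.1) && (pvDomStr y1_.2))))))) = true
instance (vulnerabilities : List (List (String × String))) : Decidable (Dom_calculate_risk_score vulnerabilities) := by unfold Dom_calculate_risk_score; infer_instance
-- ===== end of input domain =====

-- B restructures A's single accumulating branch-chain loop into two passes (normalize, then score
-- as 100 minus a weighted sum of category counts, clamped with max/min); same cost, alternative shape.

-- ===== PORT A =====
def calculate_risk_score (vulnerabilities : List (List (String × String))) : Option Int :=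
  if vulnerabilities = [] then none
  else
    let score : Int := vulnerabilities.foldl (fun score v =>
      let severity := PySem.Str.lower (((PySem.Dict.mk v).get? "severity").getD "")
      if severity = "critical" then score - 25
      else if severity = "high" then score - 15
      else if severity = "medium" then score - 8
      else if severity = "low" then score - 3
      else score) 100
    let score := if score < 0 then 0 else score
    let score := if score > 100 then 100 else score
    some score

-- ===== PORT B =====
def calculate_risk_score_alt (vulnerabilities : List (List (String × String))) : Option Int :=
  if vulnerabilities = [] then none
  else
    let sevs := vulnerabilities.map (fun v =>
      PySem.Str.lower (((PySem.Dict.mk v).get? "severity").getD ""))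
    let penalty : Int := ([("critical", (25 : Int)), ("high", 15), ("medium", 8), ("low", 3)].map
      (fun p => p.2 * (PySem.List.count sevs p.1 : Int))).sum
    some (max 0 (min 100 (100 - penalty)))

-- ===== PRECONDITION & SPEC =====
def Spec_calculate_risk_score (vulnerabilities : List (List (String × String))) (out : Option Int) : Prop := out = calculate_risk_score_alt vulnerabilities
instance (vulnerabilities : List (List (String × String))) (out : Option Int) : Decidable (Spec_calculate_risk_score vulnerabilities out) := by unfold Spec_calculate_risk_score; infer_instance

-- ===== CLAIM (what is proved, stated in full; the proofs are below) =====
def Claim_equal_calculate_risk_score : Prop := ∀ (vulnerabilities : List (List (String × String))), Dom_calculate_risk_score vulnerabilities → Spec_calculate_risk_score vulnerabilities (calculate_risk_score vulnerabilities)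

-- ===== LEMMAS AND PROOFS =====

-- the normalized severity of one record (shared subexpression of both ports)
def pvNorm (v : List (String × String)) : String :=
  PySem.Str.lower (((PySem.Dict.mk v).get? "severity").getD "")

-- the per-record penalty implicit in A's branch chain
def pvW (s : String) : Int :=
  if s = "critical" then 25
  else if s = "high" then 15
  else if s = "medium" then 8
  else if s = "low" then 3
  else 0

def pvPen (l : List (List (String × String))) : Int := (l.map (fun v => pvW (pvNorm v))).sum

theorem pvPen_nonneg (l : List (List (String × String))) : 0 ≤ pvPen l := by
  induction l with
  | nil => simp [pvPen]
  | cons v t ih =>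
    simp only [pvPen, List.map_cons, List.sum_cons] at *
    have : 0 ≤ pvW (pvNorm v) := by unfold pvW; split_ifs <;> omega
    omega

theorem pvFoldA (l : List (List (String × String))) (s : Int) :
    l.foldl (fun score v =>
      let severity := PySem.Str.lower (((PySem.Dict.mk v).get? "severity").getD "")
      if severity = "critical" then score - 25
      else if severity = "high" then score - 15
      else if severity = "medium" then score - 8
      else if severity = "low" then score - 3
      else score) s = s - pvPen l := by
  induction l generalizing s with
  | nil => simp [pvPen]
  | cons v t ih =>
    simp only [List.foldl_cons, ih, pvPen, List.map_cons, List.sum_cons]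
    unfold pvW pvNorm
    split_ifs <;> ring

theorem pvPenB (l : List (List (String × String))) :
    ([("critical", (25 : Int)), ("high", 15), ("medium", 8), ("low", 3)].map
      (fun p => p.2 * (PySem.List.count (l.map (fun v =>
        PySem.Str.lower (((PySem.Dict.mk v).get? "severity").getD ""))) p.1 : Int))).sum = pvPen l := by
  induction l with
  | nil => simp [pvPen, PySem.List.count]
  | cons v t ih =>
    simp only [List.map_cons, List.sum_cons, pvPen] at *
    simp only [PySem.List.count_eq, List.count_cons] at *
    by_cases h1 : pvNorm v = "critical" <;> by_cases h2 : pvNorm v = "high" <;>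
      by_cases h3 : pvNorm v = "medium" <;> by_cases h4 : pvNorm v = "low" <;>
      simp_all [pvNorm, pvW] <;> omega

-- ===== VERDICT (by name: the statement is the Claim_ definition above) =====
theorem calculate_risk_score_spec : Claim_equal_calculate_risk_score := by
  intro vs _
  unfold Spec_calculate_risk_score calculate_risk_score calculate_risk_score_alt
  by_cases h : vs = []
  · simp [h]
  · simp only [h, if_false]
    rw [pvFoldA, pvPenB]
    have hp := pvPen_nonneg vs
    split_ifs <;> simp only [Option.some.injEq] <;> omega
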